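-- pv_equiv track=rewrite | github.com/Rutrus/wordle | wordle/WordleFilter.py | contain_letters
-- ===== SOURCE A (Python) =====
-- def contain_letters(letters_yes: list, word: str):
--     if len(set(letters_yes)) != len(letters_yes):
--         for letter in letters_yes:
--             if letter not in word:
--                 return False
--             else:
--                 reps = letters_yes.count(letter)
--                 if word.count(letter) < reps:
--                     return False
--         return True
--
--     return set(letters_yes).issubset(set(word))
-- ===== SOURCE B (Python) =====
-- def contain_letters(letters_yes: list, word: str):
--     need = {}
--     for letter in letters_yes:
--         need[letter] = need.get(letter, 0) + 1
--     return all(word.count(letter) >= n for letter, n in need.items())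
-- ===== Notes on version B (the rewrite author's own statement) =====
-- stated objective: simpler
-- what changed: A's two different-shaped passes (a duplicate-detection test choosing between a per-letter scan with list.count/str.count and a set-subset test) are replaced by one frequency-table comparison: build a counter of the required letters once and check each distinct letter's required count against word.count, removing the repeated list.count scans.
-- intended difference: On duplicate-free lists whose every element occurs in word as a substring but where some element is not a single character (e.g. [''] or ['ab'] with word 'xaby'), A returns False because its no-duplicate branch tests membership in word's character set, while B returns True — the substring-counting semantics A itself applies to lists with duplicates, so B's answer is the intended one. — e.g. on contain_letters(["ab"], "ab"): A returns false, B returns true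
import Mathlib
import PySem

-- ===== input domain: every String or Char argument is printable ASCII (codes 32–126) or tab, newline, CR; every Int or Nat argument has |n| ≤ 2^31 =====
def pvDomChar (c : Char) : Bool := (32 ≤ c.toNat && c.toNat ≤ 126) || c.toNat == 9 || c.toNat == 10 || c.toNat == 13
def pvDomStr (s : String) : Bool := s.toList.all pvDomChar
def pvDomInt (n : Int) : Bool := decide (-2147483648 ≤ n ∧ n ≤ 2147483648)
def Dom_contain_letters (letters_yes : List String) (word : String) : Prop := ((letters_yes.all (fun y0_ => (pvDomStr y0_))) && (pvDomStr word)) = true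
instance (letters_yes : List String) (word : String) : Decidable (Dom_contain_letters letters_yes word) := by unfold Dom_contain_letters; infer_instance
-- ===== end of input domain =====

-- B replaces A's two-branch scan (duplicate-aware counting loop vs set-subset test) by a single
-- frequency-table comparison (a counter of required letters checked against word.count); objective:
-- simpler; on duplicate-free lists containing a non-single-character element that occurs in word,
-- B returns the substring-counting answer where A's set branch returns False (see D_ below).


-- ===== PORT A =====
-- the early-returning for-loop of A's duplicate branch
def containLoopA (orig : List String) (word : String) : List String → Bool
  | [] => true
  | letter :: rest =>
    if ¬ PySem.Str.isIn letter word then false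
    else if PySem.Str.count word letter < orig.count letter then false
    else containLoopA orig word rest

def contain_letters (letters_yes : List String) (word : String) : Bool :=
  if PySem.Set.len (PySem.Set.ofList letters_yes) ≠ letters_yes.length then
    containLoopA letters_yes word letters_yes
  else
    -- iterating a Python string yields its characters as 1-char strings
    PySem.Set.issubset (PySem.Set.ofList letters_yes)
      (PySem.Set.ofList (word.toList.map (fun c => String.ofList [c])))

-- ===== PORT B =====
def contain_letters_alt (letters_yes : List String) (word : String) : Bool :=
  let needD := letters_yes.foldl
      (fun d letter => d.insert letter (d.getD letter 0 + 1)) (PySem.Dict.empty : PySem.Dict String Int)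
  needD.items.all (fun kv => decide ((PySem.Str.count word kv.1 : Int) ≥ kv.2))

-- ===== PRECONDITION & SPEC =====
-- On duplicate-free lists whose every element occurs in word as a substring but where some element
-- is not a single character (e.g. '' or 'ab'), A returns False because its no-duplicate branch
-- tests membership in word's character set, while B returns True — the substring-counting
-- semantics A itself applies to lists with duplicates, so B's answer is the intended one.
def D_contain_letters (letters_yes : List String) (word : String) : Prop :=
  letters_yes.Nodup ∧ (∀ l ∈ letters_yes, PySem.Str.isIn l word = true) ∧
    (∃ l ∈ letters_yes, l.toList.length ≠ 1)
instance (letters_yes : List String) (word : String) : Decidable (D_contain_letters letters_yes word) := by unfold D_contain_letters; infer_instance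

def Spec_contain_letters (letters_yes : List String) (word : String) (out : Bool) : Prop := ¬ D_contain_letters letters_yes word → out = contain_letters_alt letters_yes word
instance (letters_yes : List String) (word : String) (out : Bool) : Decidable (Spec_contain_letters letters_yes word out) := by unfold Spec_contain_letters; infer_instance

def pvDiffWitness_contain_letters : List String × String := (["ab"], "ab")
def pvDiffWitnessOut_contain_letters : Bool × Bool := (false, true)

-- ===== CLAIM (what is proved, stated in full; the proofs are below) =====
def Claim_unchanged_contain_letters : Prop := ∀ (letters_yes : List String) (word : String), Dom_contain_letters letters_yes word → Spec_contain_letters letters_yes word (contain_letters letters_yes word)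
def Claim_changed_contain_letters : Prop := Dom_contain_letters (pvDiffWitness_contain_letters.1) (pvDiffWitness_contain_letters.2) ∧ D_contain_letters (pvDiffWitness_contain_letters.1) (pvDiffWitness_contain_letters.2) ∧ contain_letters (pvDiffWitness_contain_letters.1) (pvDiffWitness_contain_letters.2) = pvDiffWitnessOut_contain_letters.1 ∧ contain_letters_alt (pvDiffWitness_contain_letters.1) (pvDiffWitness_contain_letters.2) = pvDiffWitnessOut_contain_letters.2 ∧ pvDiffWitnessOut_contain_letters.1 ≠ pvDiffWitnessOut_contain_letters.2
def Claim_exact_contain_letters : Prop := ∀ (letters_yes : List String) (word : String), Dom_contain_letters letters_yes word → D_contain_letters letters_yes word → contain_letters letters_yes word ≠ contain_letters_alt letters_yes word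

-- ===== LEMMAS AND PROOFS =====

-- the counting loop of str.count never decreases its accumulator
theorem count_go_le (sub : List Char) : ∀ (fuel : Nat) (s : List Char) (acc : Nat),
    acc ≤ PySem.Chars.count.go sub fuel s acc := by
  intro fuel
  induction fuel with
  | zero => intro s acc; cases s <;> simp [PySem.Chars.count.go]
  | succ n ih =>
    intro s acc
    cases s with
    | nil => simp [PySem.Chars.count.go]
    | cons h t =>
      rw [PySem.Chars.count.go]
      split_ifs with hp
      · exact le_trans (by omega) (ih _ (acc + 1))
      · exact ih t acc

-- str.count is positive exactly when the needle occurs (nonempty needle)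
theorem count_go_pos_iff (sub : List Char) (hsub : sub ≠ []) : ∀ (fuel : Nat) (s : List Char) (acc : Nat),
    s.length ≤ fuel →
    (acc < PySem.Chars.count.go sub fuel s acc ↔ ∃ j, sub <+: s.drop j) := by
  intro fuel
  induction fuel with
  | zero =>
    intro s acc hf
    have : s = [] := List.eq_nil_of_length_eq_zero (by omega)
    subst this
    simp [PySem.Chars.count.go]
    exact fun hj => hsub hj
  | succ n ih =>
    intro s acc hf
    cases s with
    | nil =>
      simp [PySem.Chars.count.go]
      exact fun hj => hsub hj
    | cons h t =>
      rw [PySem.Chars.count.go]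
      split_ifs with hp
      · constructor
        · intro _; exact ⟨0, by simpa using List.isPrefixOf_iff_prefix.mp hp⟩
        · intro _
          have := count_go_le sub n ((h :: t).drop sub.length) (acc + 1)
          omega
      · rw [ih t acc (by simpa using Nat.le_of_succ_le_succ hf)]
        constructor
        · rintro ⟨j, hj⟩; exact ⟨j + 1, by simpa using hj⟩
        · rintro ⟨j, hj⟩
          cases j with
          | zero =>
            exact absurd (List.isPrefixOf_iff_prefix.mpr (by simpa using hj)) hp
          | succ j' => exact ⟨j', by simpa using hj⟩

theorem count_pos_iff_isIn (word l : String) :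
    0 < PySem.Str.count word l ↔ PySem.Str.isIn l word = true := by
  rw [PySem.Str.count_eq]
  by_cases hl : l.toList = []
  · unfold PySem.Chars.count
    simp [hl]
  · unfold PySem.Chars.count
    rw [if_neg (by simpa using hl)]
    rw [count_go_pos_iff l.toList hl word.toList.length word.toList 0 le_rfl]
    rw [show PySem.Str.isIn l word = PySem.Chars.isIn l.toList word.toList from by
      simp [PySem.Str.isIn_eq]]
    exact PySem.Chars.exists_prefix_drop_iff_isIn l.toList word.toList

-- PySem.Set.ofList is a sublist of its input
theorem foldl_add_sublist {α : Type} [BEq α] (xs : List α) : ∀ (s : List α),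
    ∃ t, xs.foldl PySem.Set.add s = s ++ t ∧ t.Sublist xs := by
  induction xs with
  | nil => intro s; exact ⟨[], by simp⟩
  | cons x xs ih =>
    intro s
    simp only [List.foldl_cons, PySem.Set.add]
    by_cases hx : s.contains x = true
    · obtain ⟨t, ht, hs⟩ := ih s
      exact ⟨t, by simp [hx, ht], hs.cons x⟩
    · obtain ⟨t, ht, hs⟩ := ih (s ++ [x])
      exact ⟨x :: t, by simp [hx, ht], hs.cons₂ x⟩

theorem nodup_of_len_ofList_eq {α : Type} [BEq α] [LawfulBEq α] (xs : List α)
    (h : (PySem.Set.ofList xs).length = xs.length) : xs.Nodup := by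
  obtain ⟨t, ht, hs⟩ := foldl_add_sublist xs ([] : List α)
  have hof : PySem.Set.ofList xs = t := by simpa [PySem.Set.ofList] using ht
  have : PySem.Set.ofList xs = xs := by
    rw [hof] at h ⊢
    exact hs.eq_of_length h
  have hn := PySem.Set.nodup_ofList (xs := xs)
  rwa [this] at hn

theorem foldl_add_of_nodup {α : Type} [BEq α] [LawfulBEq α] (xs : List α) : ∀ (s : List α),
    (s ++ xs).Nodup → xs.foldl PySem.Set.add s = s ++ xs := by
  induction xs with
  | nil => intro s _; simp
  | cons x xs ih =>
    intro s hnd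
    have hxs : x ∉ s := by
      intro hmem
      exact (List.disjoint_of_nodup_append hnd) hmem (by simp)
    have hx : PySem.Set.contains s x = false := by
      simpa [PySem.Set.contains] using hxs
    rw [List.foldl_cons]
    have hadd : PySem.Set.add s x = s ++ [x] := by unfold PySem.Set.add; rw [hx]; simp
    rw [hadd, ih (s ++ [x]) (by simpa using hnd)]
    simp

theorem ofList_of_nodup {α : Type} [BEq α] [LawfulBEq α] (xs : List α) (h : xs.Nodup) :
    PySem.Set.ofList xs = xs := by
  have := foldl_add_of_nodup xs [] (by simpa using h)
  simpa [PySem.Set.ofList] using this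

-- characterisation of A's duplicate-branch loop
theorem containLoopA_iff (orig : List String) (word : String) (ls : List String) :
    containLoopA orig word ls = true ↔
      ∀ l ∈ ls, PySem.Str.isIn l word = true ∧ PySem.Str.count word l ≥ orig.count l := by
  induction ls with
  | nil => simp [containLoopA]
  | cons l rest ih =>
    simp only [containLoopA]
    by_cases h1 : PySem.Str.isIn l word = true
    · rw [if_neg (not_not_intro h1)]
      by_cases h2 : PySem.Str.count word l < orig.count l
      · rw [if_pos h2]
        refine iff_of_false (by simp) ?_
        intro hall
        have := (hall l (by simp)).2
        omega
      · rw [if_neg h2, ih]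
        constructor
        · intro hall l' hl'
          rcases List.mem_cons.mp hl' with rfl | hm
          · exact ⟨h1, by omega⟩
          · exact hall l' hm
        · intro hall l' hl'
          exact hall l' (List.mem_cons_of_mem _ hl')
    · rw [if_pos h1]
      refine iff_of_false (by simp) ?_
      intro hall
      exact h1 (hall l (by simp)).1

-- B's hand-written counting fold IS Counter(letters_yes)
theorem foldl_insert_eq_counter {α : Type} [BEq α] [LawfulBEq α] (xs : List α) :
    xs.foldl (fun d x => d.insert x (d.getD x 0 + 1)) (PySem.Dict.empty : PySem.Dict α Int)
      = PySem.Dict.counter xs := by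
  rw [PySem.Dict.counter_eq_foldl]
  congr 1

-- B as a pointwise count comparison over the distinct required letters
theorem alt_eq_all (letters_yes : List String) (word : String) :
    contain_letters_alt letters_yes word =
      (PySem.Set.ofList letters_yes).all (fun k =>
        decide ((PySem.Str.count word k : Int) ≥ (letters_yes.count k : Int))) := by
  unfold contain_letters_alt
  simp only [foldl_insert_eq_counter, PySem.Dict.items_counter, List.all_map]
  congr 1

-- membership in set(word) (1-char strings) means: single character occurring in word
theorem mem_singleton_map_iff (word : String) (l : String) :
    l ∈ word.toList.map (fun c => String.ofList [c]) ↔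
      l.toList.length = 1 ∧ PySem.Str.isIn l word = true := by
  rw [List.mem_map]
  constructor
  · rintro ⟨c, hc, rfl⟩
    refine ⟨by simp, ?_⟩
    rw [PySem.Str.isIn_iff_infix]
    simpa using (List.singleton_infix_iff c word.toList).mpr hc
  · rintro ⟨hlen, hin⟩
    obtain ⟨c, hc⟩ : ∃ c, l.toList = [c] := by
      cases h : l.toList with
      | nil => simp [h] at hlen
      | cons a t => cases t with
        | nil => exact ⟨a, rfl⟩
        | cons b t' => simp [h] at hlen
    refine ⟨c, ?_, ?_⟩
    · rw [PySem.Str.isIn_iff_infix, hc] at hin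
      exact (List.singleton_infix_iff c word.toList).mp hin
    · have := congrArg String.ofList hc
      simpa using this.symm

theorem contain_letters_unchanged' (letters_yes : List String) (word : String)
    (hnd : ¬ D_contain_letters letters_yes word) :
    contain_letters letters_yes word = contain_letters_alt letters_yes word := by
  rw [alt_eq_all]
  unfold contain_letters
  rw [Bool.eq_iff_iff]
  split_ifs with hdup
  · -- duplicate branch: A's loop ↔ the count comparison (D_ never holds here)
    rw [containLoopA_iff]
    simp only [List.all_eq_true, decide_eq_true_eq, PySem.Set.mem_ofList]
    constructor
    · intro hall k hk
      exact_mod_cast (hall k hk).2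
    · intro hall k hk
      have hcnt : PySem.Str.count word k ≥ letters_yes.count k := by
        exact_mod_cast hall k hk
      have hpos : 0 < letters_yes.count k := List.count_pos_iff.mpr hk
      exact ⟨(count_pos_iff_isIn word k).mp (by omega), hcnt⟩
  · -- no-duplicate branch: set-subset test ↔ the count comparison, using ¬ D_
    have hnodup : letters_yes.Nodup := by
      apply nodup_of_len_ofList_eq
      simpa [PySem.Set.len] using Decidable.not_not.mp hdup
    unfold PySem.Set.issubset PySem.Set.contains
    simp only [List.all_eq_true, decide_eq_true_eq, PySem.Set.mem_ofList,
      List.contains_iff_mem, mem_singleton_map_iff]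
    have hD : ¬ ((∀ l ∈ letters_yes, PySem.Str.isIn l word = true) ∧
        ∃ l ∈ letters_yes, l.toList.length ≠ 1) := by
      intro ⟨h1, h2⟩
      exact hnd ⟨hnodup, h1, h2⟩
    constructor
    · intro hall k hk
      have hone : letters_yes.count k = 1 := List.count_eq_one_of_mem hnodup hk
      have hpos : 0 < PySem.Str.count word k := (count_pos_iff_isIn word k).mpr (hall k hk).2
      rw [hone]
      exact_mod_cast hpos
    · intro hall k hk
      have hin : ∀ l ∈ letters_yes, PySem.Str.isIn l word = true := by
        intro l hl
        have hone : letters_yes.count l = 1 := List.count_eq_one_of_mem hnodup hl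
        have h := hall l hl
        rw [hone] at h
        have hpos : 0 < PySem.Str.count word l := by exact_mod_cast h
        exact (count_pos_iff_isIn word l).mp hpos
      have hlen : ∀ l ∈ letters_yes, l.toList.length = 1 := by
        intro l hl
        by_contra hne
        exact hD ⟨hin, l, hl, hne⟩
      exact ⟨hlen k hk, hin k hk⟩

-- ===== VERDICT (by name: the statement is the Claim_ definition above) =====
theorem contain_letters_spec : Claim_unchanged_contain_letters := by
  intro letters_yes word _ hnd
  exact contain_letters_unchanged' letters_yes word hnd

theorem contain_letters_changed : Claim_changed_contain_letters := by
  unfold Claim_changed_contain_letters; decide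

theorem contain_letters_tight : Claim_exact_contain_letters := by
  intro letters_yes word _ hD
  obtain ⟨hnodup, hin, l0, hl0, hlen0⟩ := hD
  have hA : contain_letters letters_yes word = false := by
    unfold contain_letters
    rw [if_neg (by simp [PySem.Set.len, ofList_of_nodup letters_yes hnodup])]
    apply (Bool.not_eq_true _).mp
    intro hsub
    unfold PySem.Set.issubset PySem.Set.contains at hsub
    simp only [List.all_eq_true, PySem.Set.mem_ofList, List.contains_iff_mem,
      mem_singleton_map_iff] at hsub
    exact hlen0 (hsub l0 hl0).1
  have hB : contain_letters_alt letters_yes word = true := by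
    rw [alt_eq_all]
    simp only [List.all_eq_true, decide_eq_true_eq, PySem.Set.mem_ofList]
    intro k hk
    have hone : letters_yes.count k = 1 := List.count_eq_one_of_mem hnodup hk
    have hpos : 0 < PySem.Str.count word k := (count_pos_iff_isIn word k).mpr (hin k hk)
    rw [hone]
    exact_mod_cast hpos
  rw [hA, hB]
  simp
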